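-- pv_equiv track=rewrite | github.com/Eladtopaz/CodeWars-Walkthrough | 5 kyu/Decimal to Factorial and Back/python_solution.py | dec_2_fact_string
-- ===== SOURCE A (Python) =====
-- converter = {
--     "10": "A",
--     "11": "B",
--     "12": "C",
--     "13": "D",
--     "14": "E",
--     "15": "F",
--     "16": "G",
--     "17": "H",
--     "18": "I",
--     "19": "J",
--     "20": "K",
--     "21": "L",
--     "22": "M",
--     "23": "N",
--     "24": "O",
--     "25": "P",
--     "26": "Q",
--     "27": "R",
--     "28": "S",
--     "29": "T",
--     "30": "U",
--     "31": "V",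
--     "32": "W",
--     "33": "X",
--     "34": "Y",
--     "35": "Z"
-- }
--
-- def dec_2_fact_string(nb):
--
--     st = "0"
--     x = 2
--     while nb > 0:
--         new_digit = str(nb % x)
--         if new_digit in converter:
--             new_digit = converter[new_digit]
--         st += new_digit
--         nb = nb // x
--         x += 1
--     return st[::-1]
-- ===== SOURCE B (Python) =====
-- def _char(d):
--     return chr(48 + d) if d < 10 else chr(55 + d)
--
-- def _digits(n, f, i):
--     # factorial-base digits of n at positions i..1, most-significant first (f = i!)
--     if i == 0:
--         return ""
--     return _char(n // f) + _digits(n % f, f // i, i - 1)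
--
-- def dec_2_fact_string(nb):
--     if nb <= 0:
--         return "0"
--     k, f = 1, 1
--     while f * (k + 1) <= nb:
--         k += 1
--         f *= k
--     return _digits(nb, f, k) + "0"
-- ===== Notes on version B (the rewrite author's own statement) =====
-- stated objective: alternative
-- what changed: B replaces A's low-to-high modulo loop (append digits, then reverse the string) by a most-significant-first walk: it searches the largest k with k! <= nb, then peels digits high-to-low via nb // f and nb % f with f stepping down through the factorials, mapping each digit arithmetically to '0'-'9'/'A'-'Z' instead of via the string-keyed dict.
import Mathlib
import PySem

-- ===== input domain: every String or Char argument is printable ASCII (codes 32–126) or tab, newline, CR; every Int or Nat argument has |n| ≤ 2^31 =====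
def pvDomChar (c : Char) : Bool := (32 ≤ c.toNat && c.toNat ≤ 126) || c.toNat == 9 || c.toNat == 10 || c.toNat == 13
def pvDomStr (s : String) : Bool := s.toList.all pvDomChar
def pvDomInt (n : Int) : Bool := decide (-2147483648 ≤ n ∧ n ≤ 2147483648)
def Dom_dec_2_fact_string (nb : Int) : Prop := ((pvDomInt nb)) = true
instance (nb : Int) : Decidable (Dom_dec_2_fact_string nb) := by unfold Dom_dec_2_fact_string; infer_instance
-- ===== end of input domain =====

-- B rewrites A's low-to-high modulo loop (build then reverse) as a most-significant-first
-- factorial-base walk; objective: alternative algorithm of similar cost.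

-- ===== PORT A =====
-- the module-level 'converter' dict (str -> str)
def converter : PySem.Dict (List Char) (List Char) := PySem.Dict.ofList
  [("10".toList, "A".toList), ("11".toList, "B".toList), ("12".toList, "C".toList),
   ("13".toList, "D".toList), ("14".toList, "E".toList), ("15".toList, "F".toList),
   ("16".toList, "G".toList), ("17".toList, "H".toList), ("18".toList, "I".toList),
   ("19".toList, "J".toList), ("20".toList, "K".toList), ("21".toList, "L".toList),
   ("22".toList, "M".toList), ("23".toList, "N".toList), ("24".toList, "O".toList),
   ("25".toList, "P".toList), ("26".toList, "Q".toList), ("27".toList, "R".toList),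
   ("28".toList, "S".toList), ("29".toList, "T".toList), ("30".toList, "U".toList),
   ("31".toList, "V".toList), ("32".toList, "W".toList), ("33".toList, "X".toList),
   ("34".toList, "Y".toList), ("35".toList, "Z".toList)]

-- new_digit = str(nb % x); if new_digit in converter: new_digit = converter[new_digit]
-- (Python str ported on List Char, the sanctioned bridge)
def aDigit (m : Int) : List Char :=
  let nd := PySem.Int.toChars m
  if converter.contains nd then (converter.get? nd).getD nd else nd

-- the while loop; Python's x is k+2 (x starts at 2 and increases by 1 each pass)
def aLoop (nb : Int) (k : Nat) (st : List Char) : List Char :=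
  if h : nb > 0 then
    aLoop (PySem.Int.floordiv nb ((k : Int) + 2)) (k + 1)
      (st ++ aDigit (PySem.Int.mod nb ((k : Int) + 2)))
  else st
termination_by nb.toNat
decreasing_by
  have hnb : nb = ((nb.toNat : Nat) : Int) := (Int.toNat_of_nonneg (le_of_lt h)).symm
  have hc : ((k : Int) + 2) = ((k + 2 : Nat) : Int) := by push_cast; ring
  rw [hnb, hc, PySem.Int.floordiv_natCast]
  simp only [Int.toNat_natCast]
  exact Nat.div_lt_self (by omega) (by omega)

def dec_2_fact_string (nb : Int) : String :=
  let st := String.ofList (aLoop nb 0 "0".toList)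
  (PySem.Str.slice? st none none (-1)).getD st    -- st[::-1] (step -1 ≠ 0: never none)

-- ===== PORT B =====
def altChar (d : Nat) : Char :=
  if d < 10 then Char.ofNat (48 + d) else Char.ofNat (55 + d)

-- _digits(n, f, i): factorial-base digits of n at positions i..1, MSD first (f = i!)
def altDigits (n f i : Nat) : List Char :=
  match i with
  | 0 => []
  | j + 1 => altChar (n / f) :: altDigits (n % f) (f / (j + 1)) j

-- the k,f search loop: largest k with k! <= n (invariants 1 ≤ k, 1 ≤ f carried for termination)
def altFindK (n k f : Nat) (hk : 1 ≤ k) (hf : 1 ≤ f) : Nat × Nat :=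
  if h : f * (k + 1) ≤ n then
    altFindK n (k + 1) (f * (k + 1)) (by omega) (Nat.mul_pos hf (by omega))
  else (k, f)
termination_by n + 1 - f
decreasing_by
  have h2 : f * 2 ≤ f * (k + 1) := Nat.mul_le_mul_left f (by omega)
  omega

def dec_2_fact_string_alt (nb : Int) : String :=
  if nb ≤ 0 then "0"
  else
    let n := nb.toNat
    let p := altFindK n 1 1 (le_refl 1) (le_refl 1)
    String.ofList (altDigits n p.2 p.1 ++ "0".toList)

-- ===== PRECONDITION & SPEC =====
def Spec_dec_2_fact_string (nb : Int) (out : String) : Prop := out = dec_2_fact_string_alt nb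
instance (nb : Int) (out : String) : Decidable (Spec_dec_2_fact_string nb out) := by unfold Spec_dec_2_fact_string; infer_instance

-- ===== CLAIM (what is proved, stated in full; the proofs are below) =====
def Claim_equal_dec_2_fact_string : Prop := ∀ (nb : Int), Dom_dec_2_fact_string nb → Spec_dec_2_fact_string nb (dec_2_fact_string nb)

-- ===== LEMMAS AND PROOFS =====

-- prodR x i = x * (x+1) * … * (x+i-1): the product of i consecutive radices starting at x
def prodR (x i : Nat) : Nat :=
  match i with
  | 0 => 1
  | j + 1 => x * prodR (x + 1) j

-- mixed-radix digits of n, LSD first, i of them, radices x, x+1, …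
def lsdD (i n x : Nat) : List Nat :=
  match i with
  | 0 => []
  | j + 1 => (n % x) :: lsdD j (n / x) (x + 1)

-- the same digits, MSD first
def msdD (i n x : Nat) : List Nat :=
  match i with
  | 0 => []
  | j + 1 => (n / prodR x j) :: msdD j (n % prodR x j) x

-- LSD digits as A's loop computes them (stops at 0; divisor is k+2)
def lsdU (n k : Nat) : List Nat :=
  if h : n = 0 then [] else (n % (k + 2)) :: lsdU (n / (k + 2)) (k + 1)
termination_by n
decreasing_by exact Nat.div_lt_self (by omega) (by omega)

theorem prodR_pos : ∀ i x, 0 < x → 0 < prodR x i := by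
  intro i
  induction i with
  | zero => intro x _; simp [prodR]
  | succ j ih => intro x hx; simpa [prodR] using Nat.mul_pos hx (ih (x+1) (by omega))

theorem prodR_succ_right : ∀ i x, prodR x (i + 1) = prodR x i * (x + i) := by
  intro i
  induction i with
  | zero => intro x; simp [prodR]
  | succ j ih =>
      intro x
      have := ih (x + 1)
      simp only [prodR] at *
      rw [this]
      ring

theorem prodR_two_eq : ∀ i, prodR 2 i = Nat.factorial (i + 1) := by
  intro i
  induction i with
  | zero => simp [prodR, Nat.factorial]
  | succ j ih =>
      rw [prodR_succ_right, ih]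
      have h1 : (j + 1 + 1).factorial = (j + 1 + 1) * (j + 1).factorial :=
        Nat.factorial_succ _
      rw [h1]
      ring

theorem msd_peel : ∀ i x n, 0 < x → n < prodR x (i + 1) →
    msdD (i + 1) n x = msdD i (n / x) (x + 1) ++ [n % x] := by
  intro i
  induction i with
  | zero =>
      intro x n hx hn
      simp only [prodR] at hn
      simp only [msdD, prodR, Nat.div_one, List.nil_append]
      have : n < x := by
        have := prodR_pos 0 (x+1) (by omega)
        simp [prodR] at this ⊢
        omega
      rw [Nat.mod_eq_of_lt this]
  | succ j ih =>
      intro x n hx hn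
      have hq : 0 < prodR (x + 1) (j + 1) := prodR_pos _ _ (by omega)
      have hm : n % prodR x (j + 1 + 1 - 1) < prodR x (j + 1) := by
        exact Nat.mod_lt _ (prodR_pos _ _ hx)
      -- unfold one step on both sides
      show (n / prodR x (j+1)) :: msdD (j+1) (n % prodR x (j+1)) x
          = ((n / x / prodR (x+1) j) :: msdD j ((n / x) % prodR (x+1) j) (x+1)) ++ [n % x]
      have hxq : prodR x (j + 1) = x * prodR (x + 1) j := rfl
      have e1 : n / prodR x (j+1) = n / x / prodR (x+1) j := by
        rw [hxq, Nat.div_div_eq_div_mul]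
      have e2 : (n % prodR x (j+1)) % x = n % x := by
        rw [hxq]; exact Nat.mod_mod_of_dvd n ⟨prodR (x+1) j, rfl⟩
      have e3 : (n % prodR x (j+1)) / x = (n / x) % prodR (x+1) j := by
        rw [hxq]; exact Nat.mod_mul_right_div_self n x (prodR (x+1) j)
      have hrec := ih x (n % prodR x (j+1)) hx (Nat.mod_lt _ (prodR_pos _ _ hx))
      rw [hrec, e1, e2, e3]
      simp

theorem lsd_reverse_eq_msd : ∀ i x n, 0 < x → n < prodR x i →
    (lsdD i n x).reverse = msdD i n x := by
  intro i
  induction i with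
  | zero => intro x n _ _; simp [lsdD, msdD]
  | succ j ih =>
      intro x n hx hn
      have hdiv : n / x < prodR (x + 1) j := by
        have hxq : prodR x (j + 1) = x * prodR (x + 1) j := rfl
        rw [hxq] at hn
        exact (Nat.div_lt_iff_lt_mul hx).mpr (by rw [Nat.mul_comm]; exact hn)
      simp only [lsdD, List.reverse_cons]
      rw [ih (x + 1) (n / x) (by omega) hdiv]
      exact (msd_peel j x n hx hn).symm

theorem lsdU_eq_lsdD : ∀ i k n, n < prodR (k + 2) i →
    (i ≠ 0 → prodR (k + 2) (i - 1) ≤ n) → lsdU n k = lsdD i n (k + 2) := by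
  intro i
  induction i with
  | zero =>
      intro k n hn _
      simp only [prodR] at hn
      have : n = 0 := by omega
      subst this
      rw [lsdU]; simp [lsdD]
  | succ j ih =>
      intro k n hn hlo
      have hge : prodR (k + 2) j ≤ n := hlo (by omega)
      have hnpos : 0 < n := lt_of_lt_of_le (prodR_pos j (k + 2) (by omega)) hge
      rw [lsdU]
      simp only [lsdD]
      rw [dif_neg (by omega)]
      congr 1
      have hxq : prodR (k + 2) (j + 1) = (k + 2) * prodR (k + 3) j := rfl
      have hdiv : n / (k + 2) < prodR (k + 3) j := by
        rw [hxq] at hn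
        exact (Nat.div_lt_iff_lt_mul (by omega)).mpr (by rw [Nat.mul_comm]; exact hn)
      have hlo' : j ≠ 0 → prodR (k + 3) (j - 1) ≤ n / (k + 2) := by
        intro hj
        obtain ⟨j', rfl⟩ : ∃ j', j = j' + 1 := ⟨j - 1, by omega⟩
        have hxq' : prodR (k + 2) (j' + 1) = (k + 2) * prodR (k + 3) j' := rfl
        rw [hxq'] at hge
        have h1 : prodR (k + 3) j' ≤ n / (k + 2) :=
          (Nat.le_div_iff_mul_le (by omega)).mpr (by rw [Nat.mul_comm]; exact hge)
        simpa using h1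
      have h2 : n / (k + 2) < prodR (k + 1 + 2) j := hdiv
      have h3 : j ≠ 0 → prodR (k + 1 + 2) (j - 1) ≤ n / (k + 2) := hlo'
      exact ih (k + 1) (n / (k + 2)) h2 h3

-- the per-digit bridge: A's str+converter transform equals B's character, for digits ≤ 35
set_option maxRecDepth 8192 in
theorem aDigit_eq_altChar_fin : ∀ d : Fin 36, aDigit ((d : Nat) : Int) = [altChar d] := by decide

theorem aDigit_eq_altChar (d : Nat) (hd : d ≤ 35) : aDigit (d : Int) = [altChar d] :=
  aDigit_eq_altChar_fin ⟨d, by omega⟩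

theorem aLoop_eq : ∀ j k (n : Nat) st, n < prodR (k + 2) j → k + 2 + j ≤ 36 →
    aLoop (n : Int) k st = st ++ (lsdU n k).map altChar := by
  intro j
  induction j with
  | zero =>
      intro k n st hn _
      simp only [prodR] at hn
      have : n = 0 := by omega
      subst this
      rw [aLoop, lsdU]
      simp
  | succ j ih =>
      intro k n st hn hk36
      by_cases hz : n = 0
      · subst hz; rw [aLoop, lsdU]; simp
      · rw [aLoop]
        rw [dif_pos (by exact_mod_cast Nat.pos_of_ne_zero hz)]
        have hc : ((k : Int) + 2) = ((k + 2 : Nat) : Int) := by push_cast; ring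
        rw [hc, PySem.Int.mod_natCast, PySem.Int.floordiv_natCast]
        have hdig : n % (k + 2) ≤ 35 := by
          have := Nat.mod_lt n (y := k + 2) (by omega)
          omega
        rw [aDigit_eq_altChar _ hdig]
        have hxq : prodR (k + 2) (j + 1) = (k + 2) * prodR (k + 3) j := rfl
        have hdiv : n / (k + 2) < prodR (k + 3) j := by
          rw [hxq] at hn
          exact (Nat.div_lt_iff_lt_mul (by omega)).mpr (by rw [Nat.mul_comm]; exact hn)
        have := ih (k + 1) (n / (k + 2)) (st ++ [altChar (n % (k + 2))])
          (by simpa using hdiv) (by omega)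
        rw [this]
        conv_rhs => rw [lsdU]
        rw [dif_neg hz]
        simp

theorem altFindK_spec : ∀ m n k f (hk : 1 ≤ k) (hf : 1 ≤ f), n + 1 - f ≤ m →
    f = Nat.factorial k → f ≤ n →
    ∃ K, altFindK n k f hk hf = (K, Nat.factorial K) ∧ 1 ≤ K ∧
      Nat.factorial K ≤ n ∧ n < Nat.factorial (K + 1) := by
  intro m
  induction m with
  | zero =>
      intro n k f hk hf hm hfact hfn
      omega
  | succ m ih =>
      intro n k f hk hf hm hfact hfn
      rw [altFindK]
      by_cases h : f * (k + 1) ≤ n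
      · rw [dif_pos h]
        have h2 : f * 2 ≤ f * (k + 1) := Nat.mul_le_mul_left f (by omega)
        refine ih n (k + 1) (f * (k + 1)) (by omega) (Nat.mul_pos hf (by omega)) (by omega) ?_ h
        rw [hfact, Nat.factorial_succ, Nat.mul_comm]
      · rw [dif_neg h]
        refine ⟨k, by rw [hfact], hk, by omega, ?_⟩
        rw [Nat.factorial_succ, Nat.mul_comm, ← hfact]
        omega

theorem altDigits_eq : ∀ i n, altDigits n (Nat.factorial i) i = (msdD i n 2).map altChar := by
  intro i
  induction i with
  | zero => intro n; simp [altDigits, msdD]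
  | succ j ih =>
      intro n
      simp only [altDigits, msdD, List.map_cons]
      have e1 : prodR 2 j = Nat.factorial (j + 1) := prodR_two_eq j
      have e2 : Nat.factorial (j + 1) / (j + 1) = Nat.factorial j := by
        rw [Nat.factorial_succ]
        exact Nat.mul_div_cancel_left _ (by omega)
      rw [e1, e2, ih]

-- assembling A's side: chars of A's result before the final reversal
theorem aSide (n : Nat) (hn : n ≤ 2147483648) :
    aLoop (n : Int) 0 "0".toList = '0' :: (lsdU n 0).map altChar := by
  have hlt : n < prodR 2 12 := by
    have : prodR 2 12 = 6227020800 := by decide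
    omega
  have := aLoop_eq 12 0 n "0".toList (by simpa using hlt) (by omega)
  simpa using this

-- ===== VERDICT (by name: the statement is the Claim_ definition above) =====
theorem dec_2_fact_string_spec : Claim_equal_dec_2_fact_string := by
  intro nb hdom
  unfold Spec_dec_2_fact_string
  have hdom' : -2147483648 ≤ nb ∧ nb ≤ 2147483648 := by
    simpa [Dom_dec_2_fact_string, pvDomInt] using hdom
  by_cases hpos : nb ≤ 0
  · -- A: the loop body never runs, st = "0", and "0" reversed is "0"
    unfold dec_2_fact_string dec_2_fact_string_alt
    rw [if_pos hpos, aLoop, dif_neg (by omega)]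
    show (PySem.Str.slice? (String.ofList "0".toList) none none (-1)).getD
        (String.ofList "0".toList) = "0"
    decide
  · have hpos' : 0 < nb := by omega
    set n := nb.toNat with hn
    have hnb : nb = (n : Int) := by omega
    have hn1 : 1 ≤ n := by omega
    have hnle : n ≤ 2147483648 := by omega
    -- B's k,f search finds the leading position K (K! ≤ n < (K+1)!)
    obtain ⟨K, hfind, hK1, hKle, hKlt⟩ :=
      altFindK_spec (n + 1) n 1 1 (le_refl 1) (le_refl 1) (by omega)
        (by simp [Nat.factorial]) (by omega)
    -- the two digit lists are reverses of one another
    have hrevmsd : (lsdU n 0).reverse = msdD K n 2 := by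
      have hub : n < prodR 2 K := by rw [prodR_two_eq]; omega
      have hlb : K ≠ 0 → prodR 2 (K - 1) ≤ n := by
        intro _
        rw [prodR_two_eq]
        have hK : K - 1 + 1 = K := by omega
        rw [hK]; omega
      have e := lsdU_eq_lsdD K 0 n hub hlb
      rw [e]
      exact lsd_reverse_eq_msd K 2 n (by omega) hub
    -- A's side
    unfold dec_2_fact_string
    rw [hnb, aSide n hnle]
    show (PySem.Str.slice? (String.ofList ('0' :: (lsdU n 0).map altChar)) none none (-1)).getD
        (String.ofList ('0' :: (lsdU n 0).map altChar)) = dec_2_fact_string_alt (n : Int)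
    rw [PySem.Str.slice?_none_none_neg_one, Option.getD_some, String.toList_ofList]
    -- B's side
    unfold dec_2_fact_string_alt
    rw [if_neg (by omega)]
    show String.ofList (('0' :: (lsdU n 0).map altChar).reverse)
        = String.ofList (altDigits n (altFindK n 1 1 (le_refl 1) (le_refl 1)).2
            (altFindK n 1 1 (le_refl 1) (le_refl 1)).1 ++ "0".toList)
    rw [hfind]
    show String.ofList (('0' :: (lsdU n 0).map altChar).reverse)
        = String.ofList (altDigits n (Nat.factorial K) K ++ "0".toList)
    rw [altDigits_eq]
    congr 1
    rw [List.reverse_cons, ← List.map_reverse, hrevmsd]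
    rfl
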